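-- pv_equiv track=rewrite | github.com/fqf2009/LeetCode | python/lc2155_AllDivisionsWithHighestScoreOfBinaryArray.py | maxScoreIndices
-- ===== SOURCE A (Python) =====
-- from typing import List
--
-- def maxScoreIndices(nums: List[int]) -> List[int]:
--     zeros = 0
--     ones = nums.count(1)
--     res = [0]
--     score = ones
--     for i in range(len(nums)):
--         if nums[i] == 0:
--             zeros += 1
--             if zeros + ones > score:
--                 score = zeros + ones
--                 res = [i+1]
--             elif zeros + ones == score:
--                 res.append(i+1)
--         else:
--             ones -= 1
--
--     return res
-- ===== SOURCE B (Python) =====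
-- from typing import List
--
-- def maxScoreIndices(nums: List[int]) -> List[int]:
--     ones = nums.count(1)
--     zeros = 0
--     scores = [ones]
--     for x in nums:
--         if x == 0:
--             zeros += 1
--         else:
--             ones -= 1
--         scores.append(zeros + ones)
--     m = max(scores)
--     return [j for j, s in enumerate(scores) if s == m]
-- ===== Notes on version B (the rewrite author's own statement) =====
-- stated objective: simpler
-- what changed: Replaces A's fused running-best scan (inline score/result resets and appends, with the comparison skipped on 1s) by a table build: compute the full list of split scores, take its max, then filter the indices that attain it in a second pass.
import Mathlib
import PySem

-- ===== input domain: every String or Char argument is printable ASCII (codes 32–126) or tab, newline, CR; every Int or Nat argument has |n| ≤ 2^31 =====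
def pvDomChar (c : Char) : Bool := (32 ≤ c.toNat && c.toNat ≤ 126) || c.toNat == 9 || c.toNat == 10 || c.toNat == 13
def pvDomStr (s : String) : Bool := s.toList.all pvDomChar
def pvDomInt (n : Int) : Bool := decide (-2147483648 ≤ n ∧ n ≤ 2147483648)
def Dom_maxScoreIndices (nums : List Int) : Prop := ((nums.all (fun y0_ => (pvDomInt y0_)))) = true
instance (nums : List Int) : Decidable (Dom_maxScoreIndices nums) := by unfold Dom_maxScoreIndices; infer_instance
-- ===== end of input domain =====

-- B replaces A's fused running-best scan by a full scores table, its max, and an index filter; objective: simpler.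


-- ===== PORT A =====
-- A's loop body over the state (zeros, ones, res, score); i is the loop index of 'for i in range(len(nums))'
def stepA (nums : List Int) (st : Int × Int × List Int × Int) (i : Int) : Int × Int × List Int × Int :=
  let (zeros, ones, res, score) := st
  if PySem.List.pyGetD nums i 0 = 0 then
    let zeros := zeros + 1
    if zeros + ones > score then (zeros, ones, [i + 1], zeros + ones)
    else if zeros + ones = score then (zeros, ones, res ++ [i + 1], score)
    else (zeros, ones, res, score)
  else (zeros, ones - 1, res, score)

def maxScoreIndices (nums : List Int) : List Int :=
  let ones : Int := (PySem.List.count nums 1 : Int)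
  let st := (PySem.List.pyRange 0 (PySem.List.len nums) 1).foldl (stepA nums) (0, ones, [0], ones)
  st.2.2.1

-- ===== PORT B =====
-- B's scores-building loop body over the state (scores, zeros, ones)
def stepB (st : List Int × Int × Int) (x : Int) : List Int × Int × Int :=
  let (scores, zeros, ones) := st
  let (zeros, ones) := if x = 0 then (zeros + 1, ones) else (zeros, ones - 1)
  (scores ++ [zeros + ones], zeros, ones)

def maxScoreIndices_alt (nums : List Int) : List Int :=
  let ones : Int := (PySem.List.count nums 1 : Int)
  let st := nums.foldl stepB ([ones], 0, ones)
  let scores := st.1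
  let m := (PySem.List.max? scores (fun s => s)).getD 0
  (PySem.List.enumerate scores 0).foldl (fun acc p => if p.2 = m then acc ++ [p.1] else acc) []

-- ===== PRECONDITION & SPEC =====
def Spec_maxScoreIndices (nums : List Int) (out : List Int) : Prop := out = maxScoreIndices_alt nums
instance (nums : List Int) (out : List Int) : Decidable (Spec_maxScoreIndices nums out) := by unfold Spec_maxScoreIndices; infer_instance

-- ===== CLAIM (what is proved, stated in full; the proofs are below) =====
def Claim_equal_maxScoreIndices : Prop := ∀ (nums : List Int), Dom_maxScoreIndices nums → Spec_maxScoreIndices nums (maxScoreIndices nums)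

-- ===== LEMMAS AND PROOFS =====

-- A's loop body with the looked-up element supplied directly (p = (index, value))
def stepA' (st : Int × Int × List Int × Int) (p : Int × Int) : Int × Int × List Int × Int :=
  let (zeros, ones, res, score) := st
  if p.2 = 0 then
    let zeros := zeros + 1
    if zeros + ones > score then (zeros, ones, [p.1 + 1], zeros + ones)
    else if zeros + ones = score then (zeros, ones, res ++ [p.1 + 1], score)
    else (zeros, ones, res, score)
  else (zeros, ones - 1, res, score)

-- split scores after each element of the list, given zero count z and remaining ones o
def tsc (z o : Int) : List Int → List Int
  | [] => []
  | x :: l => if x = 0 then (z + 1 + o) :: tsc (z + 1) o l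
              else (z + (o - 1)) :: tsc z (o - 1) l

-- indices (counting from j) of the elements equal to M, in order
def idxEq (M j : Int) : List Int → List Int
  | [] => []
  | s :: t => (if s = M then [j] else []) ++ idxEq M (j + 1) t

-- characterization of A's loop on the enumerated list
lemma loopA_spec : ∀ (l : List Int) (z o sc : Int) (res : List Int) (j : Int), z + o ≤ sc →
    ∃ z' o',
      (PySem.List.enumerate l j).foldl stepA' (z, o, res, sc)
        = (z', o',
           (if (tsc z o l).foldl max sc = sc then res else [])
             ++ idxEq ((tsc z o l).foldl max sc) (j + 1) (tsc z o l),
           (tsc z o l).foldl max sc) := by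
  intro l
  induction l with
  | nil =>
    intro z o sc res j _
    exact ⟨z, o, by simp [PySem.List.enumerate_nil, tsc, idxEq]⟩
  | cons x t ih =>
    intro z o sc res j h
    rw [PySem.List.enumerate_cons]
    by_cases hx : x = 0
    · -- a zero: score of the next split is z + 1 + o
      have hts : tsc z o (x :: t) = (z + 1 + o) :: tsc (z + 1) o t := by simp [tsc, hx]
      rcases lt_trichotomy sc (z + 1 + o) with hlt | heq | hgt
      · -- strictly better: reset
        have hstep : stepA' (z, o, res, sc) (j, x) = (z + 1, o, [j + 1], z + 1 + o) := by
          simp [stepA', hx]; omega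
        obtain ⟨z', o', ihh⟩ := ih (z + 1) o (z + 1 + o) [j + 1] (j + 1) (le_refl _)
        refine ⟨z', o', ?_⟩
        rw [List.foldl_cons, hstep, ihh, hts]
        have hM : ((z + 1 + o) :: tsc (z + 1) o t).foldl max sc
            = (tsc (z + 1) o t).foldl max (z + 1 + o) := by
          simp [List.foldl_cons, max_eq_right (le_of_lt hlt)]
        have hge : z + 1 + o ≤ (tsc (z + 1) o t).foldl max (z + 1 + o) :=
          (PySem.List.le_foldl_max _ _).1
        rw [hM]
        simp only [idxEq]
        have hne : (tsc (z + 1) o t).foldl max (z + 1 + o) ≠ sc := by omega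
        simp [hne, eq_comm]
      · -- tie: append
        have hstep : stepA' (z, o, res, sc) (j, x) = (z + 1, o, res ++ [j + 1], sc) := by
          have h2 : z + 1 + o = sc := heq.symm
          simp [stepA', hx, h2]
        obtain ⟨z', o', ihh⟩ := ih (z + 1) o sc (res ++ [j + 1]) (j + 1) (by omega)
        refine ⟨z', o', ?_⟩
        rw [List.foldl_cons, hstep, ihh, hts]
        have hM : ((z + 1 + o) :: tsc (z + 1) o t).foldl max sc
            = (tsc (z + 1) o t).foldl max sc := by
          simp [List.foldl_cons, max_eq_left (le_of_eq heq.symm)]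
        have hge : sc ≤ (tsc (z + 1) o t).foldl max sc := (PySem.List.le_foldl_max _ _).1
        rw [hM]
        simp only [idxEq]
        by_cases hMs : (tsc (z + 1) o t).foldl max sc = sc
        · simp [hMs, ← heq]
        · have : z + 1 + o ≠ (tsc (z + 1) o t).foldl max sc := by omega
          simp [hMs, this]
      · -- worse: skip
        have hstep : stepA' (z, o, res, sc) (j, x) = (z + 1, o, res, sc) := by
          have h1 : ¬ (z + 1 + o > sc) := by omega
          have h2 : ¬ (z + 1 + o = sc) := by omega
          simp [stepA', hx, h1, h2]
        obtain ⟨z', o', ihh⟩ := ih (z + 1) o sc res (j + 1) (by omega)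
        refine ⟨z', o', ?_⟩
        rw [List.foldl_cons, hstep, ihh, hts]
        have hM : ((z + 1 + o) :: tsc (z + 1) o t).foldl max sc
            = (tsc (z + 1) o t).foldl max sc := by
          simp [List.foldl_cons, max_eq_left (le_of_lt hgt)]
        have hge : sc ≤ (tsc (z + 1) o t).foldl max sc := (PySem.List.le_foldl_max _ _).1
        rw [hM]
        simp only [idxEq]
        have : z + 1 + o ≠ (tsc (z + 1) o t).foldl max sc := by omega
        simp [this]
    · -- a one (or any non-zero): ones decreases, score of the next split drops below sc
      have hts : tsc z o (x :: t) = (z + (o - 1)) :: tsc z (o - 1) t := by simp [tsc, hx]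
      have hstep : stepA' (z, o, res, sc) (j, x) = (z, o - 1, res, sc) := by
        simp [stepA', hx]
      obtain ⟨z', o', ihh⟩ := ih z (o - 1) sc res (j + 1) (by omega)
      refine ⟨z', o', ?_⟩
      rw [List.foldl_cons, hstep, ihh, hts]
      have hlt : z + (o - 1) < sc := by omega
      have hM : ((z + (o - 1)) :: tsc z (o - 1) t).foldl max sc
          = (tsc z (o - 1) t).foldl max sc := by
        simp [List.foldl_cons, max_eq_left (le_of_lt hlt)]
      have hge : sc ≤ (tsc z (o - 1) t).foldl max sc := (PySem.List.le_foldl_max _ _).1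
      rw [hM]
      simp only [idxEq]
      have : z + (o - 1) ≠ (tsc z (o - 1) t).foldl max sc := by omega
      simp [this]

-- B's scores loop builds acc ++ tsc z o l
lemma loopB_spec : ∀ (l : List Int) (acc : List Int) (z o : Int),
    ∃ z' o', l.foldl stepB (acc, z, o) = (acc ++ tsc z o l, z', o') := by
  intro l
  induction l with
  | nil => intro acc z o; exact ⟨z, o, by simp [tsc]⟩
  | cons x t ih =>
    intro acc z o
    by_cases hx : x = 0
    · obtain ⟨z', o', ihh⟩ := ih (acc ++ [z + 1 + o]) (z + 1) o
      exact ⟨z', o', by simp [List.foldl_cons, stepB, hx, ihh, tsc]⟩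
    · obtain ⟨z', o', ihh⟩ := ih (acc ++ [z + (o - 1)]) z (o - 1)
      exact ⟨z', o', by simp [List.foldl_cons, stepB, hx, ihh, tsc]⟩

-- B's comprehension collects exactly the indices whose score equals m
lemma filterB_spec : ∀ (s : List Int) (m j : Int) (acc : List Int),
    (PySem.List.enumerate s j).foldl (fun acc p => if p.2 = m then acc ++ [p.1] else acc) acc
      = acc ++ idxEq m j s := by
  intro s
  induction s with
  | nil => intro m j acc; simp [PySem.List.enumerate_nil, idxEq]
  | cons x t ih =>
    intro m j acc
    rw [PySem.List.enumerate_cons, List.foldl_cons]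
    by_cases hx : x = m
    · simp [hx, ih, idxEq]
    · simp [hx, ih, idxEq]

-- ===== VERDICT (by name: the statement is the Claim_ definition above) =====
theorem maxScoreIndices_spec : Claim_equal_maxScoreIndices := by
  intro nums _
  unfold Spec_maxScoreIndices maxScoreIndices maxScoreIndices_alt
  set ones : Int := (PySem.List.count nums 1 : Int) with hones
  -- A's fold over range(len(nums)) is the fold of stepA' over the enumerated list
  have hA : (PySem.List.pyRange 0 (PySem.List.len nums) 1).foldl (stepA nums) (0, ones, [0], ones)
      = (PySem.List.enumerate nums 0).foldl stepA' (0, ones, [0], ones) := by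
    rw [PySem.List.enumerate_eq_map_pyRange (d := 0), List.foldl_map]
    rfl
  obtain ⟨zA, oA, hAres⟩ := loopA_spec nums 0 ones ones [0] 0 (by omega)
  -- B's scores list
  obtain ⟨zB, oB, hBres⟩ := loopB_spec nums [ones] 0 ones
  have hscores : (nums.foldl stepB ([ones], 0, ones)).1 = ones :: tsc 0 ones nums := by
    rw [hBres]; rfl
  set M : Int := (tsc 0 ones nums).foldl max ones with hM
  have hmax : (PySem.List.max? (ones :: tsc 0 ones nums) (fun s => s)).getD 0 = M := by
    rw [PySem.List.max?_id_cons]; rfl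
  simp only [hA, hAres, hscores, hmax]
  rw [filterB_spec]
  simp only [idxEq, List.nil_append]
  rw [show (0 : Int) + 1 = 1 from rfl]
  by_cases hMe : M = ones
  · simp [hMe]
  · have : ones ≠ M := fun h => hMe h.symm
    simp [hMe, this]
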